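-- pv_equiv track=rewrite | github.com/AndreaValentini025/ImageClustering | utils.py | ottieni_stringhe_n_volte
-- ===== SOURCE A (Python) =====
-- def ottieni_stringhe_n_volte(vettore, n):
--     '''
--     codice Python che prende un vettore di stringhe
--     e restituisce un secondo vettore contenente solo
--     le stringhe che compaiono un numero
--     specifico di volte
--     '''
--     conteggio_stringhe = {}
--     for stringa in vettore:
--         if stringa in conteggio_stringhe:
--             conteggio_stringhe[stringa] += 1
--         else:
--             conteggio_stringhe[stringa] = 1
--
--     vettore_risultato = []
--     for stringa in vettore:
--         if conteggio_stringhe[stringa] == n and stringa not in vettore_risultato: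
--             vettore_risultato.append(stringa)
--
--     return vettore_risultato
-- ===== SOURCE B (Python) =====
-- def ottieni_stringhe_n_volte(vettore, n):
--     conteggio_stringhe = {}
--     for stringa in vettore:
--         conteggio_stringhe[stringa] = conteggio_stringhe.get(stringa, 0) + 1
--     return [stringa for stringa, c in conteggio_stringhe.items() if c == n]
-- ===== Notes on version B (the rewrite author's own statement) =====
-- stated objective: simpler
-- what changed: The second scan over vettore with its linear 'stringa not in vettore_risultato' dedup check is replaced by a single pass over the count dict's items (insertion order = first-occurrence order), where keys are already unique.
import Mathlib
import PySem

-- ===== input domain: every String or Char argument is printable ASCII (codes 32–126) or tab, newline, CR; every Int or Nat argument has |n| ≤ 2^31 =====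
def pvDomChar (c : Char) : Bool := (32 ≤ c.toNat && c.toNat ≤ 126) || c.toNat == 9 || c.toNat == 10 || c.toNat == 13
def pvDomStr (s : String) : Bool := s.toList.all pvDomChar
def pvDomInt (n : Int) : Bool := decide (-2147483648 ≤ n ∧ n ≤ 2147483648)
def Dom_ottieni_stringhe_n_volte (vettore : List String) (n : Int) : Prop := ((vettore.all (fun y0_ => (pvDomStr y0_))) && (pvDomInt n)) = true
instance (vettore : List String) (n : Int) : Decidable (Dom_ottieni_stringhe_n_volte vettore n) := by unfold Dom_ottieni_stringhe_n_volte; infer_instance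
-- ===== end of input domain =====

-- B replaces A's second scan over vettore (with its linear 'not in result' dedup check)
-- by one pass over the count dict's items, whose keys are already unique (simpler).

-- ===== PORT A =====
def ottieni_stringhe_n_volte (vettore : List String) (n : Int) : List String :=
  -- first loop: build conteggio_stringhe with the in/else branch, as in A
  let conteggio_stringhe : PySem.Dict String Int :=
    vettore.foldl (fun d stringa =>
      if d.contains stringa then d.insert stringa (d.getD stringa 0 + 1)
      else d.insert stringa 1) PySem.Dict.empty
  -- second loop: d[stringa] is always present here, so (get? …).getD 0 is exact
  vettore.foldl (fun vettore_risultato stringa =>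
    if ((conteggio_stringhe.get? stringa).getD 0 == n) && !(vettore_risultato.contains stringa)
    then vettore_risultato ++ [stringa] else vettore_risultato) []

-- ===== PORT B =====
def ottieni_stringhe_n_volte_alt (vettore : List String) (n : Int) : List String :=
  let conteggio_stringhe : PySem.Dict String Int :=
    vettore.foldl (fun d stringa => d.insert stringa (d.getD stringa 0 + 1)) PySem.Dict.empty
  -- list comprehension over items
  (conteggio_stringhe.items.filter (fun p => p.2 == n)).map (fun p => p.1)

-- ===== PRECONDITION & SPEC =====
def Spec_ottieni_stringhe_n_volte (vettore : List String) (n : Int) (out : List String) : Prop := out = ottieni_stringhe_n_volte_alt vettore n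
instance (vettore : List String) (n : Int) (out : List String) : Decidable (Spec_ottieni_stringhe_n_volte vettore n out) := by unfold Spec_ottieni_stringhe_n_volte; infer_instance

-- ===== CLAIM (what is proved, stated in full; the proofs are below) =====
def Claim_equal_ottieni_stringhe_n_volte : Prop := ∀ (vettore : List String) (n : Int), Dom_ottieni_stringhe_n_volte vettore n → Spec_ottieni_stringhe_n_volte vettore n (ottieni_stringhe_n_volte vettore n)

-- ===== LEMMAS AND PROOFS =====

-- A's first loop equals the branch-free counting loop
theorem countFun_eq :
    (fun (d : PySem.Dict String Int) (stringa : String) =>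
      if d.contains stringa then d.insert stringa (d.getD stringa 0 + 1)
      else d.insert stringa 1)
    = (fun (d : PySem.Dict String Int) (stringa : String) =>
      d.insert stringa (d.getD stringa 0 + 1)) := by
  funext d s
  by_cases h : d.contains s
  · simp [h]
  · simp [h, PySem.Dict.getD_of_not_contains d 0 (by simpa using h)]

-- set(pre ++ [x]) = set(pre).add x
theorem ofList_append_singleton {α : Type} [BEq α] (pre : List α) (x : α) :
    PySem.Set.ofList (pre ++ [x]) = PySem.Set.add (PySem.Set.ofList pre) x := by
  simp [PySem.Set.ofList_eq_foldl, List.foldl_append]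

-- adding a p-good element commutes with filtering by p
theorem add_filter (p : String → Bool) (S : List String) (x : String) (hx : p x = true) :
    PySem.Set.add (S.filter p) x = (PySem.Set.add S x).filter p := by
  by_cases h : x ∈ S
  · simp [PySem.Set.add, h, hx]
  · simp [PySem.Set.add, h, List.filter_append, hx]

-- adding a p-bad element disappears after filtering by p
theorem add_filter_neg (p : String → Bool) (S : List String) (x : String) (hx : p x = false) :
    (PySem.Set.add S x).filter p = S.filter p := by
  by_cases h : x ∈ S
  · simp [PySem.Set.add, h]
  · simp [PySem.Set.add, h, List.filter_append, hx]

-- A's guarded append step is 'add when p holds'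
theorem step_eq_add (p : String → Bool) (a : List String) (s : String) :
    (if p s && !(a.contains s) then a ++ [s] else a)
    = (if p s then PySem.Set.add a s else a) := by
  by_cases hp : p s
  · by_cases hc : a.contains s <;> simp [hp, PySem.Set.add]
  · simp [hp]

-- the invariant of A's second loop: result = filtered set of first occurrences
theorem loop_inv (p : String → Bool) :
    ∀ (xs pre : List String),
      xs.foldl (fun a s => if p s then PySem.Set.add a s else a)
        ((PySem.Set.ofList pre).filter p)
      = (PySem.Set.ofList (pre ++ xs)).filter p := by
  intro xs
  induction xs with
  | nil => intro pre; simp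
  | cons x xs ih =>
    intro pre
    have hstep : (if p x then PySem.Set.add ((PySem.Set.ofList pre).filter p) x
        else (PySem.Set.ofList pre).filter p)
        = (PySem.Set.ofList (pre ++ [x])).filter p := by
      rw [ofList_append_singleton]
      by_cases hp : p x
      · simp [hp, add_filter p _ x hp]
      · simp [hp, add_filter_neg p _ x (by simpa using hp)]
    have := ih (pre ++ [x])
    simpa [hstep, List.foldl_cons] using this

-- A's second loop from [] computes the filtered first-occurrence set
theorem loopA_eq (p : String → Bool) (xs : List String) :
    xs.foldl (fun a s => if p s && !(a.contains s) then a ++ [s] else a) []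
    = (PySem.Set.ofList xs).filter p := by
  have hf : (fun (a : List String) s => if p s && !(a.contains s) then a ++ [s] else a)
      = (fun a s => if p s then PySem.Set.add a s else a) := by
    funext a s; exact step_eq_add p a s
  rw [hf]
  have := loop_inv p xs []
  simpa using this

-- lookup in the counter is the count
theorem get?_counter_getD (xs : List String) (s : String) :
    ((PySem.Dict.counter xs).get? s).getD 0 = (xs.count s : Int) := by
  rw [← PySem.Dict.getD_eq_get?_getD, PySem.Dict.getD_counter]

-- ===== VERDICT (by name: the statement is the Claim_ definition above) =====
theorem ottieni_stringhe_n_volte_spec : Claim_equal_ottieni_stringhe_n_volte := by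
  intro vettore n _
  unfold Spec_ottieni_stringhe_n_volte ottieni_stringhe_n_volte ottieni_stringhe_n_volte_alt
  dsimp only
  rw [countFun_eq, PySem.Dict.foldl_insert_getD_add_one_eq_counter]
  set p : String → Bool := fun s => ((PySem.Dict.counter vettore).get? s).getD 0 == n with hp
  rw [loopA_eq p vettore]
  rw [PySem.Dict.items_counter, List.filter_map, List.map_map]
  have : (fun (q : String × Int) => q.2 == n) ∘ (fun k => (k, (vettore.count k : Int)))
      = fun k => ((vettore.count k : Int) == n) := rfl
  rw [this]
  have hpe : p = fun k => ((vettore.count k : Int) == n) := by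
    funext k; simp [hp, get?_counter_getD]
  rw [hpe]
  exact (List.map_id' _).symm
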